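-- pv_equiv track=rewrite | github.com/dmedlin87/Theoria | theo/application/reasoner/__init__.py | _count_labels
-- ===== SOURCE A (Python) =====
-- from typing import Any, Callable, Iterable, Mapping, Protocol, Sequence
--
-- def _count_labels(values: Iterable[str]) -> tuple[dict[str, int], dict[str, str]]:
--     counts: dict[str, int] = {}
--     labels: dict[str, str] = {}
--     for value in values:
--         if not value:
--             continue
--         text = value.strip()
--         if not text:
--             continue
--         key = text.lower()
--         counts[key] = counts.get(key, 0) + 1
--         labels.setdefault(key, text)
--     return counts, labels
-- ===== SOURCE B (Python) =====
-- def _count_labels(values):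
--     # one pass groups stripped texts by lowercase key; a second pass aggregates
--     groups = {}
--     for value in values:
--         text = value.strip()
--         if not text:
--             continue
--         groups.setdefault(text.lower(), []).append(text)
--     counts = {}
--     labels = {}
--     for key, texts in groups.items():
--         counts[key] = len(texts)
--         labels[key] = texts[0]
--     return counts, labels
-- ===== Notes on version B (the rewrite author's own statement) =====
-- stated objective: alternative
-- what changed: Instead of maintaining running count and first-label dicts per element, B materializes a full grouping dict key -> list of stripped texts in one pass and derives counts (len) and labels (first element) in a separate aggregation pass.
import Mathlib
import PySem

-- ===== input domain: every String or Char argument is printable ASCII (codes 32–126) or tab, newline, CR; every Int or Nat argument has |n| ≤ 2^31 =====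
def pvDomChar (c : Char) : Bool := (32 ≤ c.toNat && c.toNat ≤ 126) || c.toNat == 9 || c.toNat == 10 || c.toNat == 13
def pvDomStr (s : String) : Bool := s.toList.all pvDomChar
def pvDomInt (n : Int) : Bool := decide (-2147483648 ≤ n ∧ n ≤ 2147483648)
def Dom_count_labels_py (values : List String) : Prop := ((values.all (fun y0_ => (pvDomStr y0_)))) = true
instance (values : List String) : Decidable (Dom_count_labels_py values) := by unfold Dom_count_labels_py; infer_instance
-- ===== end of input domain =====

-- B materializes a grouping dict key → list of stripped texts in one pass and aggregates
-- counts/labels in a second pass, instead of A's per-element running count/label dicts.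


-- ===== PORT A =====
-- one fold carrying (counts, labels); literal transcription of A's loop body
def stepA (st : PySem.Dict String Int × PySem.Dict String String) (value : String) :
    PySem.Dict String Int × PySem.Dict String String :=
  if value = "" then st
  else
    let text := PySem.Str.strip value
    if text = "" then st
    else
      let key := PySem.Str.lower text
      (st.1.insert key (st.1.getD key 0 + 1), st.2.setdefault key text)

def count_labels_py (values : List String) : (List (String × Int)) × (List (String × String)) :=
  let st := values.foldl stepA (PySem.Dict.empty, PySem.Dict.empty)
  (st.1.items, st.2.items)

-- ===== PORT B =====
-- pass 1: group stripped texts by lowercase key (setdefault(...).append = modify with ++ [text])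
def stepB (g : PySem.Dict String (List String)) (value : String) : PySem.Dict String (List String) :=
  let text := PySem.Str.strip value
  if text = "" then g
  else g.modify (PySem.Str.lower text) [] (· ++ [text])

def count_labels_py_alt (values : List String) : (List (String × Int)) × (List (String × String)) :=
  let groups := values.foldl stepB PySem.Dict.empty
  -- pass 2: aggregate counts = len(texts) and labels = texts[0]
  let counts := groups.items.foldl
    (fun (c : PySem.Dict String Int) p => c.insert p.1 (p.2.length : Int)) PySem.Dict.empty
  let labels := groups.items.foldl
    (fun (l : PySem.Dict String String) p => l.insert p.1 (PySem.List.pyGetD p.2 0 "")) PySem.Dict.empty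
  (counts.items, labels.items)

-- ===== PRECONDITION & SPEC =====
def Spec_count_labels_py (values : List String) (out : (List (String × Int)) × (List (String × String))) : Prop := out = count_labels_py_alt values
instance (values : List String) (out : (List (String × Int)) × (List (String × String))) : Decidable (Spec_count_labels_py values out) := by unfold Spec_count_labels_py; infer_instance

-- ===== CLAIM (what is proved, stated in full; the proofs are below) =====
def Claim_equal_count_labels_py : Prop := ∀ (values : List String), Dom_count_labels_py values → Spec_count_labels_py values (count_labels_py values)

-- ===== LEMMAS AND PROOFS =====

def f1 (p : String × List String) : String × Int := (p.1, (p.2.length : Int))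
def f2 (p : String × List String) : String × String := (p.1, PySem.List.pyGetD p.2 0 "")

def CLInv (c : PySem.Dict String Int) (l : PySem.Dict String String)
    (g : PySem.Dict String (List String)) : Prop :=
  c.items = g.items.map f1 ∧ l.items = g.items.map f2 ∧ g.keys.Nodup ∧ ∀ p ∈ g.items, p.2 ≠ []

lemma modify_eq_insert (d : PySem.Dict String (List String)) (k : String)
    (f : List String → List String) : d.modify k [] f = d.insert k (f (d.getD k [])) := rfl

lemma keys_eq_of_items_map_f1 (c : PySem.Dict String Int) (g : PySem.Dict String (List String))
    (h : c.items = g.items.map f1) : c.keys = g.keys := by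
  simp only [PySem.Dict.keys, h, List.map_map]
  rfl

lemma strip_empty : PySem.Str.strip "" = "" := rfl

lemma pyGetD_append_singleton_of_ne_nil (v : List String) (t d : String) (h : v ≠ []) :
    PySem.List.pyGetD (v ++ [t]) 0 d = PySem.List.pyGetD v 0 d := by
  cases v with
  | nil => exact absurd rfl h
  | cons a as => simp [PySem.List.pyGetD_zero_cons]

lemma step_inv (c : PySem.Dict String Int) (l : PySem.Dict String String)
    (g : PySem.Dict String (List String)) (value : String) (h : CLInv c l g) :
    CLInv (stepA (c, l) value).1 (stepA (c, l) value).2 (stepB g value) := by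
  obtain ⟨h1, h2, h3, h4⟩ := h
  by_cases hv : value = ""
  · subst hv
    simp only [stepA, stepB, strip_empty, if_pos]
    exact ⟨h1, h2, h3, h4⟩
  · simp only [stepA, stepB, if_neg hv]
    by_cases ht : PySem.Str.strip value = ""
    · simp only [if_pos ht]
      exact ⟨h1, h2, h3, h4⟩
    · simp only [if_neg ht]
      set text := PySem.Str.strip value with htext
      set key := PySem.Str.lower text with hkey
      rw [modify_eq_insert]
      have hkeys : c.keys = g.keys := keys_eq_of_items_map_f1 c g h1
      have hck : c.contains key = g.contains key := by
        rw [PySem.Dict.contains_eq_decide_mem_keys, PySem.Dict.contains_eq_decide_mem_keys, hkeys]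
      by_cases hc : g.contains key = true
      · -- key already present
        -- the unique entry of g at key
        have hnodc : c.keys.Nodup := hkeys ▸ h3
        have hsome : (g.get? key).isSome = true := by
          rw [← PySem.Dict.contains_eq_isSome_get?]; exact hc
        obtain ⟨v, hvg⟩ := Option.isSome_iff_exists.mp hsome
        have hvmem : (key, v) ∈ g.items := PySem.Dict.mem_items_of_get?_eq_some g hvg
        have hgD : g.getD key [] = v := PySem.Dict.getD_of_mem_items g hvmem h3 []
        have hcmem : (key, (v.length : Int)) ∈ c.items := by
          rw [h1]; exact List.mem_map.mpr ⟨(key, v), hvmem, rfl⟩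
        have hcD : c.getD key 0 = (v.length : Int) := PySem.Dict.getD_of_mem_items c hcmem hnodc 0
        have hitc : (c.insert key (c.getD key 0 + 1)).items
            = c.items.map (fun p => if p.1 == key then (key, c.getD key 0 + 1) else p) :=
          PySem.Dict.items_insert_of_contains c _ (hck ▸ hc)
        have hitg : (g.insert key (g.getD key [] ++ [text])).items
            = g.items.map (fun p => if p.1 == key then (key, g.getD key [] ++ [text]) else p) :=
          PySem.Dict.items_insert_of_contains g _ hc
        refine ⟨?_, ?_, ?_, ?_⟩
        · rw [hitc, hitg, h1, List.map_map, List.map_map]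
          apply List.map_congr_left
          intro p hp
          by_cases hpk : p.1 = key
          · have hpv : p.2 = v := by
              have := PySem.Dict.get?_of_mem_items g (k := p.1) (v := p.2) (by simpa using hp) h3
              rw [hpk, hvg] at this
              exact (Option.some.injEq _ _ ▸ this.symm : _)
            simp [Function.comp, f1, hpk, hpv, hcD, hgD]
          · simp [Function.comp, f1, hpk]
        · rw [PySem.Dict.setdefault_of_contains]
          · rw [hitg, h2, List.map_map]
            apply List.map_congr_left
            intro p hp
            by_cases hpk : p.1 = key
            · have hpv : p.2 = v := by
                have := PySem.Dict.get?_of_mem_items g (k := p.1) (v := p.2) (by simpa using hp) h3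
                rw [hpk, hvg] at this
                exact (Option.some.injEq _ _ ▸ this.symm : _)
              have hvne : v ≠ [] := by
                have := h4 (key, v) hvmem; simpa using this
              simp [Function.comp, f2, hpk, hpv, hgD,
                pyGetD_append_singleton_of_ne_nil v text "" hvne]
            · simp [Function.comp, f2, hpk]
          · -- l.contains key = true
            have hlkeys : l.keys = g.keys := by
              simp only [PySem.Dict.keys, h2, List.map_map]; rfl
            rw [PySem.Dict.contains_eq_decide_mem_keys, hlkeys,
              ← PySem.Dict.contains_eq_decide_mem_keys]
            exact hc
        · rw [PySem.Dict.keys_insert_of_contains g _ hc]; exact h3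
        · intro p hp
          rw [hitg] at hp
          rcases List.mem_map.mp hp with ⟨q, hq, hqe⟩
          by_cases hqk : q.1 = key
          · simp only [hqk, beq_self_eq_true, if_pos] at hqe
            subst hqe; simp
          · simp only [beq_iff_eq, hqk, if_false] at hqe
            subst hqe; exact h4 q hq
      · -- fresh key
        have hcf : c.contains key = false := by rw [hck]; simpa using hc
        have hgf : g.contains key = false := by simpa using hc
        have hlf : l.contains key = false := by
          have hlkeys : l.keys = g.keys := by
            simp only [PySem.Dict.keys, h2, List.map_map]; rfl
          rw [PySem.Dict.contains_eq_decide_mem_keys, hlkeys,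
            ← PySem.Dict.contains_eq_decide_mem_keys, hgf]
        have hcD : c.getD key 0 = 0 := PySem.Dict.getD_of_not_contains _ _ hcf
        have hgD : g.getD key [] = [] := PySem.Dict.getD_of_not_contains _ _ hgf
        refine ⟨?_, ?_, ?_, ?_⟩
        · rw [PySem.Dict.items_insert_of_not_contains c _ hcf,
            PySem.Dict.items_insert_of_not_contains g _ hgf, h1, List.map_append, hcD, hgD]
          simp [f1]
        · rw [PySem.Dict.setdefault_of_not_contains l _ hlf,
            PySem.Dict.items_insert_of_not_contains l _ hlf,
            PySem.Dict.items_insert_of_not_contains g _ hgf, h2, List.map_append, hgD]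
          simp [f2, PySem.List.pyGetD_zero_cons]
        · rw [PySem.Dict.keys_insert_of_not_contains g _ hgf]
          refine List.Nodup.append h3 (List.nodup_singleton _) ?_
          intro x hx hx'
          simp only [List.mem_singleton] at hx'
          subst hx'
          rw [PySem.Dict.contains_eq_decide_mem_keys] at hgf
          simp at hgf
          exact hgf hx
        · intro p hp
          rw [PySem.Dict.items_insert_of_not_contains g _ hgf, hgD] at hp
          rcases List.mem_append.mp hp with hp | hp
          · exact h4 p hp
          · simp only [List.mem_singleton] at hp; subst hp; simp

lemma fold_inv (values : List String) (c : PySem.Dict String Int) (l : PySem.Dict String String)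
    (g : PySem.Dict String (List String)) (h : CLInv c l g) :
    CLInv (values.foldl stepA (c, l)).1 (values.foldl stepA (c, l)).2 (values.foldl stepB g) := by
  induction values generalizing c l g with
  | nil => exact h
  | cons v vs ih =>
    have := step_inv c l g v h
    simpa using ih (stepA (c, l) v).1 (stepA (c, l) v).2 (stepB g v) (by simpa using this)

-- ===== VERDICT (by name: the statement is the Claim_ definition above) =====
theorem count_labels_py_spec : Claim_equal_count_labels_py := by
  intro values _
  show count_labels_py values = count_labels_py_alt values
  have h0 : CLInv PySem.Dict.empty PySem.Dict.empty PySem.Dict.empty :=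
    ⟨rfl, rfl, by simp [PySem.Dict.keys_empty], fun p hp => by cases hp⟩
  obtain ⟨h1, h2, h3, h4⟩ := fold_inv values _ _ _ h0
  set g := values.foldl stepB PySem.Dict.empty with hg
  have hfresh : ∀ p ∈ g.items, (PySem.Dict.empty : PySem.Dict String Int).contains p.1 = false := by
    intro p _; simp [PySem.Dict.contains_empty]
  have hfresh2 : ∀ p ∈ g.items, (PySem.Dict.empty : PySem.Dict String String).contains p.1 = false := by
    intro p _; simp [PySem.Dict.contains_empty]
  have hnodup : (g.items.map Prod.fst).Nodup := by
    have hk : g.items.map Prod.fst = g.keys := rfl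
    rw [hk]; exact h3
  have hcounts := PySem.Dict.items_foldl_insert_fresh g.items
    (fun p => p.1) (fun p => (p.2.length : Int)) PySem.Dict.empty hfresh hnodup
  have hlabels := PySem.Dict.items_foldl_insert_fresh g.items
    (fun p => p.1) (fun p => PySem.List.pyGetD p.2 0 "") PySem.Dict.empty hfresh2 hnodup
  unfold count_labels_py count_labels_py_alt
  dsimp only [← hg]
  refine Prod.ext ?_ ?_
  · dsimp only
    rw [h1, hcounts]
    rfl
  · dsimp only
    rw [h2, hlabels]
    rfl
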